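-- pv_equiv track=rewrite | github.com/ardy1004/SBP-1 | convert_supabase.py | clean_legal_status
-- ===== SOURCE A (Python) =====
-- def clean_legal_status(value):
--     """Clean legal_status to match allowed values"""
--     if not value:
--         return ""
--
--     value = str(value).strip()
--
--     # Map common values to allowed format
--     mappings = {
--         'shm': 'SHM & IMB/PBG Lengkap',
--         'shgb': 'SHGB & IMB/PBG Lengkap',
--         'imb': 'SHM & IMB/PBG Lengkap',
--         'pbg': 'SHM & IMB/PBG Lengkap',
--         'lengkap': 'SHM & IMB/PBG Lengkap',
--         'sertifikat': 'SHM & IMB/PBG Lengkap',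
--     }
--
--     value_lower = value.lower()
--     for key, mapped in mappings.items():
--         if key in value_lower:
--             return mapped
--
--     # If contains "SHM" and "IMB"
--     if 'shm' in value_lower and ('imb' in value_lower or 'pbg' in value_lower):
--         return 'SHM & IMB/PBG Lengkap'
--
--     # If contains "SHGB" and "IMB"
--     if 'shgb' in value_lower and ('imb' in value_lower or 'pbg' in value_lower):
--         return 'SHGB & IMB/PBG Lengkap'
--
--     # Default to SHM & IMB/PBG Lengkap if unclear
--     return 'SHM & IMB/PBG Lengkap'
-- ===== SOURCE B (Python) =====
-- def clean_legal_status(value):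
--     """Clean legal_status to match allowed values"""
--     if not value:
--         return ""
--     v = str(value).strip().lower()
--     if 'shgb' in v and 'shm' not in v:
--         return 'SHGB & IMB/PBG Lengkap'
--     return 'SHM & IMB/PBG Lengkap'
-- ===== Notes on version B (the rewrite author's own statement) =====
-- stated objective: simpler
-- what changed: Replaced the 6-entry mapping dict, its scan loop and the dead post-loop fallbacks (all of which yield the SHM string except the 'shgb' entry) by one closed-form boolean test: SHGB iff 'shgb' is present and 'shm' is not.
import Mathlib
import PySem

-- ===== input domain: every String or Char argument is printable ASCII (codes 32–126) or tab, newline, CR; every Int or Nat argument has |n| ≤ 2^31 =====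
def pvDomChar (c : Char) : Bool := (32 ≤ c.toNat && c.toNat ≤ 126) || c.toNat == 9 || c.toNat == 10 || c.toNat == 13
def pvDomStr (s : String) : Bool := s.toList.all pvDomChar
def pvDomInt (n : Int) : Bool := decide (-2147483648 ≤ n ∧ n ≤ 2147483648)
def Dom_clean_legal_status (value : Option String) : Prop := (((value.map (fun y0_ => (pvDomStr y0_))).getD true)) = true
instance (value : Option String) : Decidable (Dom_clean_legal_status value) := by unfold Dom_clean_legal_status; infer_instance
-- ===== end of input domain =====

-- ===== PORT A =====
-- first matching mapping entry (early return in the for-loop over mappings.items())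
def pvMapLoop (ms : List (String × String)) (vl : String) : Option String :=
  match ms with
  | [] => none
  | (k, m) :: rest => if PySem.Str.isIn k vl then some m else pvMapLoop rest vl

def clean_legal_status (value : Option String) : String :=
  match value with
  | none => ""
  | some s =>
    if s = "" then ""
    else
      let v := PySem.Str.strip s
      let mappings : List (String × String) :=
        [("shm", "SHM & IMB/PBG Lengkap"),
         ("shgb", "SHGB & IMB/PBG Lengkap"),
         ("imb", "SHM & IMB/PBG Lengkap"),
         ("pbg", "SHM & IMB/PBG Lengkap"),
         ("lengkap", "SHM & IMB/PBG Lengkap"),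
         ("sertifikat", "SHM & IMB/PBG Lengkap")]
      let value_lower := PySem.Str.lower v
      match pvMapLoop mappings value_lower with
      | some m => m
      | none =>
        if PySem.Str.isIn "shm" value_lower &&
           (PySem.Str.isIn "imb" value_lower || PySem.Str.isIn "pbg" value_lower) then
          "SHM & IMB/PBG Lengkap"
        else if PySem.Str.isIn "shgb" value_lower &&
           (PySem.Str.isIn "imb" value_lower || PySem.Str.isIn "pbg" value_lower) then
          "SHGB & IMB/PBG Lengkap"
        else
          "SHM & IMB/PBG Lengkap"

-- ===== PORT B =====
-- B: closed-form test — SHGB iff 'shgb' present and 'shm' absent; no mapping table, no loop.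
def clean_legal_status_alt (value : Option String) : String :=
  match value with
  | none => ""
  | some s =>
    if s = "" then ""
    else
      let v := PySem.Str.lower (PySem.Str.strip s)
      if PySem.Str.isIn "shgb" v && !(PySem.Str.isIn "shm" v) then
        "SHGB & IMB/PBG Lengkap"
      else
        "SHM & IMB/PBG Lengkap"

-- ===== PRECONDITION & SPEC =====
def Spec_clean_legal_status (value : Option String) (out : String) : Prop := out = clean_legal_status_alt value
instance (value : Option String) (out : String) : Decidable (Spec_clean_legal_status value out) := by unfold Spec_clean_legal_status; infer_instance

-- ===== CLAIM (what is proved, stated in full; the proofs are below) =====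
def Claim_equal_clean_legal_status : Prop := ∀ (value : Option String), Dom_clean_legal_status value → Spec_clean_legal_status value (clean_legal_status value)

-- ===== LEMMAS AND PROOFS =====

-- ===== VERDICT (by name: the statement is the Claim_ definition above) =====
theorem clean_legal_status_spec : Claim_equal_clean_legal_status := by
  intro value _
  unfold Spec_clean_legal_status clean_legal_status clean_legal_status_alt
  match value with
  | none => rfl
  | some s =>
    by_cases hs : s = ""
    · simp [hs]
    · simp only [hs, if_false]
      set vl := PySem.Str.lower (PySem.Str.strip s) with hvl
      by_cases hshm : PySem.Chars.isIn ['s','h','m'] vl.toList = true <;>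
        by_cases hshgb : PySem.Chars.isIn ['s','h','g','b'] vl.toList = true <;>
          simp [pvMapLoop, hshm, hshgb] <;> split_ifs <;> rfl
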